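-- pv_equiv track=rewrite | github.com/lukas-sparnauskas/aoc2024 | dec9/dec9_part2.py | find_next_free_space
-- ===== SOURCE A (Python) =====
-- disk = []
--
-- def find_next_free_space(size, max_id, disk):
--     for i in range(max_id + 1):
--         if disk[i] == '.' and size == 1:
--                 return i
--         elif disk[i] == '.' and size > 1:
--             curr_size = 0
--             for j in range(i, max_id + 1):
--                 if disk[j] == '.':
--                     curr_size += 1
--                     if curr_size == size:
--                         return i
--                 else:
--                     break
--     return -1
-- ===== SOURCE B (Python) =====
-- def find_next_free_space(size, max_id, disk):
--     run = 0
--     for i in range(max_id + 1):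
--         if disk[i] == '.':
--             run += 1
--             if run == size:
--                 return i - size + 1
--         else:
--             run = 0
--     return -1
-- ===== Notes on version B (the rewrite author's own statement) =====
-- stated objective: alternative
-- what changed: replaced the nested rescan (for each '.' cell, re-count the run of dots starting there) by a single pass that tracks the length of the current consecutive run of free cells and returns i - size + 1 when the run reaches size
-- outside the precondition, e.g. on find_next_free_space(1, 5, ['.']): A returns 0, B returns 0
import Mathlib
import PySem

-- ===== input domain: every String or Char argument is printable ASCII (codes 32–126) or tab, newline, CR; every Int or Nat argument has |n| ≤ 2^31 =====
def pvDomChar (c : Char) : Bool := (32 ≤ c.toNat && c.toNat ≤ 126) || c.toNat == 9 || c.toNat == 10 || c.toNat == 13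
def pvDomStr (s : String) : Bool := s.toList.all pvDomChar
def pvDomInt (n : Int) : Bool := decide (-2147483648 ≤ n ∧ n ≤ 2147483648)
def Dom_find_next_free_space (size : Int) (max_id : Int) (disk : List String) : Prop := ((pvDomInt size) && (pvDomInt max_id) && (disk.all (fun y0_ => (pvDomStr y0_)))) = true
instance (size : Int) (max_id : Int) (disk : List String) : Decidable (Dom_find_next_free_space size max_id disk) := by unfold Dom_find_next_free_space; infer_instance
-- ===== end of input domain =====

-- B replaces A's nested rescan with one pass tracking the current run of free cells (alternative algorithm; measured speed on generated inputs was comparable).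

-- ===== PORT A =====
-- inner 'for j in range(i, max_id + 1)' loop: returns true iff curr_size reaches size before a non-'.' cell or the end
def pvAInner (size : Int) (disk : List String) : List Int → Int → Bool
  | [], _ => false
  | j :: js, curr =>
    if PySem.List.pyGet? disk j = some "." then
      if curr + 1 = size then true
      else pvAInner size disk js (curr + 1)
    else false

def pvAOuter (size : Int) (max_id : Int) (disk : List String) : List Int → Int
  | [] => -1
  | i :: is =>
    if PySem.List.pyGet? disk i = some "." ∧ size = 1 then i
    else if PySem.List.pyGet? disk i = some "." ∧ 1 < size then
      if pvAInner size disk (PySem.List.pyRange i (max_id + 1) 1) 0 then i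
      else pvAOuter size max_id disk is
    else pvAOuter size max_id disk is

def find_next_free_space (size : Int) (max_id : Int) (disk : List String) : Int :=
  pvAOuter size max_id disk (PySem.List.pyRange 0 (max_id + 1) 1)

-- ===== PORT B =====
def pvBLoop (size : Int) (disk : List String) : List Int → Int → Int
  | [], _ => -1
  | i :: is, run =>
    if PySem.List.pyGet? disk i = some "." then
      if run + 1 = size then i - size + 1
      else pvBLoop size disk is (run + 1)
    else pvBLoop size disk is 0

def find_next_free_space_alt (size : Int) (max_id : Int) (disk : List String) : Int :=
  pvBLoop size disk (PySem.List.pyRange 0 (max_id + 1) 1) 0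

-- ===== PRECONDITION & SPEC =====
-- Pre_ excludes inputs with max_id ≥ len(disk): there the Python A (and B) indexes past the end of
-- disk and raises IndexError, except when a large-enough free span is found before index len(disk)
-- and A happens to return early (one such excluded-but-returning input is cited in the claim).
def Pre_find_next_free_space (size : Int) (max_id : Int) (disk : List String) : Prop :=
  max_id < (disk.length : Int)
instance (size : Int) (max_id : Int) (disk : List String) : Decidable (Pre_find_next_free_space size max_id disk) := by unfold Pre_find_next_free_space; infer_instance

def pvWitness_find_next_free_space : Int × Int × List String := (2, 3, [".", "x", ".", "."])

def Spec_find_next_free_space (size : Int) (max_id : Int) (disk : List String) (out : Int) : Prop := out = find_next_free_space_alt size max_id disk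
instance (size : Int) (max_id : Int) (disk : List String) (out : Int) : Decidable (Spec_find_next_free_space size max_id disk out) := by unfold Spec_find_next_free_space; infer_instance

-- ===== CLAIM (what is proved, stated in full; the proofs are below) =====
def Claim_equal_find_next_free_space : Prop := ∀ (size : Int) (max_id : Int) (disk : List String), Dom_find_next_free_space size max_id disk → Pre_find_next_free_space size max_id disk → Spec_find_next_free_space size max_id disk (find_next_free_space size max_id disk)

-- ===== LEMMAS AND PROOFS =====

-- abbreviation used only by the proofs: cell t of disk is a free cell
def pvDot (disk : List String) (t : Int) : Prop := PySem.List.pyGet? disk t = some "."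

-- size ≤ 0: A never enters a branch
theorem pvA_nonpos (size max_id : Int) (disk : List String) (hs : size ≤ 0) :
    ∀ L : List Int, pvAOuter size max_id disk L = -1 := by
  intro L
  induction L with
  | nil => rfl
  | cons i is ih =>
      simp only [pvAOuter]
      split_ifs with h1 h2 <;> first | (exfalso; omega) | exact ih

-- size ≤ 0: B never returns early (run stays ≥ 0)
theorem pvB_nonpos (size : Int) (disk : List String) (hs : size ≤ 0) :
    ∀ (L : List Int) (run : Int), 0 ≤ run → pvBLoop size disk L run = -1 := by
  intro L
  induction L with
  | nil => intro run _; rfl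
  | cons i is ih =>
      intro run hr
      simp only [pvBLoop]
      split_ifs with h1 h2
      · exfalso; omega
      · exact ih _ (by omega)
      · exact ih _ (by omega)

-- size = 1: both return the first free cell
theorem pv_size_one (max_id : Int) (disk : List String) :
    ∀ L : List Int, pvAOuter 1 max_id disk L = pvBLoop 1 disk L 0 := by
  intro L
  induction L with
  | nil => rfl
  | cons i is ih =>
      simp only [pvAOuter, pvBLoop]
      by_cases hd : PySem.List.pyGet? disk i = some "."
      · simp [hd]
      · simp only [hd, false_and, if_false]
        exact ih

-- inner loop returns true when size free cells (counted from curr) lie ahead within range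
theorem pvInner_true (size max_id : Int) (disk : List String) :
    ∀ (m : Nat) (s curr : Int), 0 < m → curr + m = size →
      (∀ t, s ≤ t → t < s + m → pvDot disk t) → s + m ≤ max_id + 1 →
      pvAInner size disk (PySem.List.pyRange s (max_id + 1) 1) curr = true := by
  intro m
  induction m with
  | zero => omega
  | succ m ih =>
      intro s curr _ hsum hdots hle
      simp only [pvDot] at hdots
      rw [PySem.List.pyRange_one_cons (by push_cast at hle ⊢; omega)]
      simp only [pvAInner]
      rw [if_pos (hdots s (le_refl s) (by push_cast; omega))]
      by_cases hc : curr + 1 = size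
      · rw [if_pos hc]
      · rw [if_neg hc]
        have hm : 0 < m := by push_cast at hsum; omega
        exact ih (s + 1) (curr + 1) hm (by push_cast at hsum ⊢; omega)
          (fun t ht1 ht2 => show pvDot disk t from hdots t (by omega) (by push_cast at ht2 ⊢; omega))
          (by push_cast at hle ⊢; omega)

-- inner loop returns false when the free run ahead is too short and ends at a non-free cell in range
theorem pvInner_false (size max_id : Int) (disk : List String) :
    ∀ (m : Nat) (s curr : Int),
      (∀ t, s ≤ t → t < s + m → pvDot disk t) → ¬ pvDot disk (s + m) → s + m < max_id + 1 →
      curr + m < size →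
      pvAInner size disk (PySem.List.pyRange s (max_id + 1) 1) curr = false := by
  intro m
  induction m with
  | zero =>
      intro s curr _ hnd hlt _
      simp only [pvDot] at hnd
      rw [PySem.List.pyRange_one_cons (by push_cast at hlt; omega)]
      simp only [pvAInner]
      rw [if_neg (by push_cast at hnd; simpa using hnd)]
  | succ m ih =>
      intro s curr hdots hnd hlt hsz
      have hdots' := hdots
      simp only [pvDot] at hdots'
      rw [PySem.List.pyRange_one_cons (by push_cast at hlt; omega)]
      simp only [pvAInner]
      rw [if_pos (hdots' s (le_refl s) (by push_cast; omega))]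
      rw [if_neg (by push_cast at hsz; omega)]
      exact ih (s + 1) (curr + 1)
        (fun t ht1 ht2 => hdots t (by omega) (by push_cast at ht2 ⊢; omega))
        (by rw [show s + 1 + ((m : Nat) : Int) = s + (((m + 1 : Nat)) : Int) from by push_cast; ring]; exact hnd)
        (by push_cast at hlt ⊢; omega) (by push_cast at hsz ⊢; omega)

-- inner loop returns false when the range is exhausted before curr reaches size through free cells
theorem pvInner_false_end (size max_id : Int) (disk : List String) :
    ∀ (fuel : Nat) (s curr : Int), fuel = (max_id + 1 - s).toNat →
      (∀ t, s ≤ t → t < max_id + 1 → pvDot disk t) → curr + (max_id + 1 - s) < size →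
      pvAInner size disk (PySem.List.pyRange s (max_id + 1) 1) curr = false := by
  intro fuel
  induction fuel with
  | zero =>
      intro s curr hf _ _
      rw [PySem.List.pyRange_one_eq_nil (by omega)]
      rfl
  | succ fuel ih =>
      intro s curr hf hdots hsz
      have hdots' := hdots
      simp only [pvDot] at hdots'
      have hlt : s < max_id + 1 := by omega
      rw [PySem.List.pyRange_one_cons hlt]
      simp only [pvAInner]
      rw [if_pos (hdots' s (le_refl s) hlt)]
      rw [if_neg (by omega)]
      exact ih (s + 1) (curr + 1) (by omega)
        (fun t ht1 ht2 => hdots t (by omega) ht2) (by omega)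

-- A skips a too-short free run terminated by a non-free cell in range
theorem pvA_skip (size max_id : Int) (disk : List String) (hs : 1 < size) :
    ∀ (m : Nat) (s : Int),
      (∀ t, s ≤ t → t < s + m → pvDot disk t) → ¬ pvDot disk (s + m) → s + m < max_id + 1 →
      (m : Int) < size →
      pvAOuter size max_id disk (PySem.List.pyRange s (max_id + 1) 1) =
      pvAOuter size max_id disk (PySem.List.pyRange (s + m + 1) (max_id + 1) 1) := by
  intro m
  induction m with
  | zero =>
      intro s _ hnd hlt _
      rw [PySem.List.pyRange_one_cons (by push_cast at hlt; omega)]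
      simp only [pvAOuter]
      rw [if_neg (fun h => hnd (show pvDot disk (s + ((0 : Nat) : Int)) from by simp only [pvDot]; simpa using h.1))]
      rw [if_neg (fun h => hnd (show pvDot disk (s + ((0 : Nat) : Int)) from by simp only [pvDot]; simpa using h.1))]
      push_cast
      norm_num
  | succ m ih =>
      intro s hdots hnd hlt hsz
      rw [PySem.List.pyRange_one_cons (by push_cast at hlt; omega)]
      simp only [pvAOuter]
      have hds : pvDot disk s := hdots s (le_refl s) (by push_cast; omega)
      rw [if_neg (by intro h; omega)]
      rw [if_pos ⟨hds, hs⟩]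
      rw [pvInner_false size max_id disk (m + 1) s 0 hdots hnd hlt (by push_cast at hsz ⊢; omega)]
      simp only [Bool.false_eq_true, if_false]
      have := ih (s + 1)
        (fun t ht1 ht2 => hdots t (by omega) (by push_cast at ht2 ⊢; omega))
        (by rw [show s + 1 + ((m : Nat) : Int) = s + (((m + 1 : Nat)) : Int) from by push_cast; ring]; exact hnd)
        (by push_cast at hlt ⊢; omega) (by push_cast at hsz ⊢; omega)
      rw [this]
      congr 2
      push_cast
      ring

-- A returns -1 on an all-free tail shorter than size
theorem pvA_tail (size max_id : Int) (disk : List String) (hs : 1 < size) :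
    ∀ (fuel : Nat) (s : Int), fuel = (max_id + 1 - s).toNat →
      (∀ t, s ≤ t → t < max_id + 1 → pvDot disk t) → max_id + 1 - s < size →
      pvAOuter size max_id disk (PySem.List.pyRange s (max_id + 1) 1) = -1 := by
  intro fuel
  induction fuel with
  | zero =>
      intro s hf _ _
      rw [PySem.List.pyRange_one_eq_nil (by omega)]
      rfl
  | succ fuel ih =>
      intro s hf hdots hsz
      have hlt : s < max_id + 1 := by omega
      rw [PySem.List.pyRange_one_cons hlt]
      simp only [pvAOuter]
      rw [if_neg (by intro h; omega)]
      rw [if_pos ⟨hdots s (le_refl s) hlt, hs⟩]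
      rw [pvInner_false_end size max_id disk ((max_id + 1 - s).toNat) s 0 rfl hdots (by omega)]
      simp only [Bool.false_eq_true, if_false]
      exact ih (s + 1) (by omega) (fun t ht1 ht2 => hdots t (by omega) ht2) (by omega)

-- main invariant for size > 1: A restarted at the beginning of the current free run equals B with that run length
theorem pv_main (size max_id : Int) (disk : List String) (hs : 1 < size) :
    ∀ (fuel : Nat) (k run : Int), fuel = (max_id + 1 - k).toNat → 0 ≤ run → run < size →
      (∀ t, k - run ≤ t → t < k → pvDot disk t) →
      pvAOuter size max_id disk (PySem.List.pyRange (k - run) (max_id + 1) 1) =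
      pvBLoop size disk (PySem.List.pyRange k (max_id + 1) 1) run := by
  intro fuel
  induction fuel with
  | zero =>
      intro k run hf hr0 hrs hdots
      rw [PySem.List.pyRange_one_eq_nil (show max_id + 1 ≤ k by omega)]
      simp only [pvBLoop]
      exact pvA_tail size max_id disk hs ((max_id + 1 - (k - run)).toNat) (k - run) rfl
        (fun t ht1 ht2 => hdots t ht1 (by omega)) (by omega)
  | succ fuel ih =>
      intro k run hf hr0 hrs hdots
      have hlt : k < max_id + 1 := by omega
      rw [PySem.List.pyRange_one_cons hlt]
      simp only [pvBLoop]
      by_cases hdk : PySem.List.pyGet? disk k = some "."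
      · rw [if_pos hdk]
        by_cases hfull : run + 1 = size
        · rw [if_pos hfull]
          -- A finds the full window starting at k - run and returns k - run = k - size + 1
          have hdots' : ∀ t, k - run ≤ t → t < (k - run) + (run + 1).toNat → pvDot disk t := by
            intro t ht1 ht2
            by_cases htk : t < k
            · exact hdots t ht1 htk
            · have : t = k := by omega
              rw [this]; exact hdk
          rw [PySem.List.pyRange_one_cons (show k - run < max_id + 1 by omega)]
          simp only [pvAOuter]
          have hdkr : pvDot disk (k - run) := hdots' (k - run) (le_refl _) (by omega)
          rw [if_neg (fun h => absurd h.2 (by omega))]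
          rw [if_pos ⟨hdkr, hs⟩]
          rw [pvInner_true size max_id disk (size.toNat) (k - run) 0 (by omega) (by omega)
            (fun t ht1 ht2 => hdots' t ht1 (by omega)) (by omega)]
          rw [if_pos rfl]
          omega
        · rw [if_neg hfull]
          have := ih (k + 1) (run + 1) (by omega) (by omega) (by omega)
            (fun t ht1 ht2 => by
              by_cases htk : t < k
              · exact hdots t (by omega) htk
              · have : t = k := by omega
                rw [this]; exact hdk)
          have heq : k + 1 - (run + 1) = k - run := by omega
          rw [heq] at this
          exact this
      · rw [if_neg hdk]
        have hskip := pvA_skip size max_id disk hs (run.toNat) (k - run)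
          (fun t ht1 ht2 => hdots t ht1 (by omega))
          (by rw [show k - run + ((run.toNat : Nat) : Int) = k from by omega]; exact hdk)
          (by omega) (by omega)
        have h1 : k - run + (run.toNat : Int) + 1 = k + 1 := by omega
        rw [h1] at hskip
        rw [hskip]
        have := ih (k + 1) 0 (by omega) (le_refl 0) (by omega) (fun t ht1 ht2 => by omega)
        simpa using this

-- ===== VERDICT (by name: the statement is the Claim_ definition above) =====
theorem find_next_free_space_spec : Claim_equal_find_next_free_space := by
  intro size max_id disk _ _
  unfold Spec_find_next_free_space find_next_free_space find_next_free_space_alt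
  rcases lt_trichotomy size 1 with h | h | h
  · rw [pvA_nonpos size max_id disk (by omega) _,
        pvB_nonpos size disk (by omega) _ 0 (le_refl 0)]
  · subst h
    exact pv_size_one max_id disk _
  · have := pv_main size max_id disk h ((max_id + 1 - 0).toNat) 0 0 (by omega) (le_refl 0)
      (by omega) (fun t ht1 ht2 => by omega)
    simpa using this
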